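-- pv_equiv track=rewrite | github.com/S1ngularD2ality/eidonic-language-elol | glyphs_801-900/glyph_823.py | glyph_823
-- ===== SOURCE A (Python) =====
-- def glyph_823(n, k):
--     """
--     Returns the visitation sequence for a star polygon (n,k).
--     Requires gcd(n, k) == 1 for a single cycle.
--     """
--     from math import gcd
--     if n < 3 or k < 1 or k >= n or gcd(n, k) != 1:
--         raise ValueError("Require n>=3, 1<=k<n, and gcd(n,k)==1")
--     seq = []
--     v = 0
--     seen = set()
--     for _ in range(n):
--         seq.append(v)
--         seen.add(v)
--         v = (v + k) % n
--     return seq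
-- ===== SOURCE B (Python) =====
-- def glyph_823(n, k):
--     """
--     Returns the visitation sequence for a star polygon (n,k).
--     Requires gcd(n, k) == 1 for a single cycle.
--     """
--     from math import gcd
--     if n < 3 or k < 1 or k >= n or gcd(n, k) != 1:
--         raise ValueError("Require n>=3, 1<=k<n, and gcd(n,k)==1")
--     return [(i * k) % n for i in range(n)]
-- ===== Notes on version B (the rewrite author's own statement) =====
-- stated objective: simpler
-- what changed: Replaces the forward-threaded accumulator v=(v+k)%n (and the dead 'seen' set) by a closed-form per-index term (i*k)%n, so each element is computed independently.
import Mathlib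
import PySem

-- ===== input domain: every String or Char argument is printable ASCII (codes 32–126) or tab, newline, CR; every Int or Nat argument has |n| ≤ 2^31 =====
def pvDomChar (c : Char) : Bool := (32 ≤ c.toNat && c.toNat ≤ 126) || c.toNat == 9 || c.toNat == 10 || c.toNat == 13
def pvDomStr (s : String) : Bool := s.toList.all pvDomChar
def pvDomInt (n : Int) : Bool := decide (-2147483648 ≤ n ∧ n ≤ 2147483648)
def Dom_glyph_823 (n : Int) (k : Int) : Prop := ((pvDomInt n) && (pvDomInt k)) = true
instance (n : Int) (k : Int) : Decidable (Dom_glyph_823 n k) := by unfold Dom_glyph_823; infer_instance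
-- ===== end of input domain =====

-- B replaces A's running accumulator v=(v+k)%n (and the dead 'seen' set) by the
-- independent closed-form term (i*k)%n per index: simpler, no threaded state.

-- ===== PORT A =====
-- loop state: (seq, seen, v); the loop variable is ignored, as in the Python
def glyph_823 (n : Int) (k : Int) : List Int :=
  ((PySem.List.pyRange 0 n 1).foldl
    (fun (st : List Int × PySem.Set Int × Int) _ =>
      (st.1 ++ [st.2.2], st.2.1.add st.2.2, PySem.Int.mod (st.2.2 + k) n))
    ([], PySem.Set.empty, 0)).1

-- ===== PORT B =====
def glyph_823_alt (n : Int) (k : Int) : List Int :=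
  (PySem.List.pyRange 0 n 1).map (fun i => PySem.Int.mod (i * k) n)

-- ===== PRECONDITION & SPEC =====
-- A raises ValueError unless n>=3, 1<=k<n and gcd(n,k)==1; exactly those inputs are excluded.
def Pre_glyph_823 (n : Int) (k : Int) : Prop :=
  3 ≤ n ∧ 1 ≤ k ∧ k < n ∧ Int.gcd n k = 1
instance (n : Int) (k : Int) : Decidable (Pre_glyph_823 n k) := by unfold Pre_glyph_823; infer_instance
def pvWitness_glyph_823 : Int × Int := (5, 2)

def Spec_glyph_823 (n : Int) (k : Int) (out : List Int) : Prop := out = glyph_823_alt n k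
instance (n : Int) (k : Int) (out : List Int) : Decidable (Spec_glyph_823 n k out) := by unfold Spec_glyph_823; infer_instance

-- ===== CLAIM (what is proved, stated in full; the proofs are below) =====
def Claim_equal_glyph_823 : Prop := ∀ (n : Int) (k : Int), Dom_glyph_823 n k → Pre_glyph_823 n k → Spec_glyph_823 n k (glyph_823 n k)

-- ===== LEMMAS AND PROOFS =====

-- loop invariant: starting from a value v fixed by (· % n), the appended entries are v + i*k (mod n)
theorem glyph_823_loop (n k : Int) (l : List Int)
    (acc : List Int) (s : PySem.Set Int) (v : Int) (hv : v % n = v) :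
    (l.foldl
      (fun (st : List Int × PySem.Set Int × Int) _ =>
        (st.1 ++ [st.2.2], st.2.1.add st.2.2, (st.2.2 + k) % n))
      (acc, s, v)).1
      = acc ++ (List.range l.length).map (fun (i : Nat) => (v + (i : Int) * k) % n) := by
  induction l generalizing acc s v with
  | nil => simp
  | cons x xs ih =>
    simp only [List.foldl_cons, List.length_cons]
    rw [ih _ _ _ (by rw [Int.emod_emod_of_dvd _ (dvd_refl n)])]
    rw [List.range_succ_eq_map, List.map_cons, List.map_map]
    simp only [Nat.cast_zero, zero_mul, add_zero, hv, List.append_assoc,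
      List.singleton_append]
    congr 1
    congr 1
    apply List.map_congr_left
    intro i _
    simp only [Function.comp_apply]
    rw [Int.emod_add_emod]
    push_cast
    ring_nf

theorem glyph_823_spec : Claim_equal_glyph_823 := by
  intro n k _ hpre
  obtain ⟨hn3, hk1, hkn, _⟩ := hpre
  have hn : 0 < n := by omega
  unfold Spec_glyph_823 glyph_823 glyph_823_alt
  simp only [PySem.Int.mod_eq_emod_of_pos hn]
  rw [glyph_823_loop n k _ _ _ 0 (Int.zero_emod n)]
  rw [PySem.List.length_pyRange_one, PySem.List.pyRange_one]
  simp only [List.nil_append, List.map_map, sub_zero]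
  apply List.map_congr_left
  intro i _
  simp only [Function.comp_apply]
  push_cast
  ring_nf
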